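-- pv_equiv track=rewrite | github.com/Subram0212/Dissertation | Computationally_Efficient_Framework_Predictor_Agent_Chapter_5/genetic_algorithm_moving_UGVUAV_age_period.py | bitstring_to_param_list
-- ===== SOURCE A (Python) =====
-- def bitstring_to_param_list(bitstring):  # This function takes an entire chromosome as input argument and returns the appropriate UGV parameter list.
--     parameter_list_conv = []
--     param_1 = str()
--     param_2 = str()
--     param_3 = str()
--     param_4 = str()
--     # param_5 = str()
--     # param_6 = str()
--     for i in range(len(bitstring)):
--         if i < 8:
--             param_1 += bitstring[i]
--         elif 8 <= i < 16:
--             param_2 += bitstring[i]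
--         # elif 16 <= i < 24:
--         #     param_3 += bitstring[i]
--         # elif 24 <= i < 32:
--         #     param_4 += bitstring[i]
--         # elif 32 <= i < 40:
--         #     param_5 += bitstring[i]
--         # elif 40 <= i < 48:
--         #     param_6 += bitstring[i]
--     parameter_list_conv.append(param_1)
--     parameter_list_conv.append(param_2)
--     # parameter_list_conv.append(param_3)
--     # parameter_list_conv.append(param_4)
--     # parameter_list_conv.append(param_5)
--     # parameter_list_conv.append(param_6)
--     return parameter_list_conv
-- ===== SOURCE B (Python) =====
-- def bitstring_to_param_list(bitstring):
--     # Direct slice extraction of the two 8-bit parameter substrings.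
--     return [bitstring[:8], bitstring[8:16]]
-- ===== Notes on version B (the rewrite author's own statement) =====
-- stated objective: faster
-- what changed: Replaces the full index-by-index loop with range branches by two direct closed-form slices bitstring[:8] and bitstring[8:16].
import Mathlib
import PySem

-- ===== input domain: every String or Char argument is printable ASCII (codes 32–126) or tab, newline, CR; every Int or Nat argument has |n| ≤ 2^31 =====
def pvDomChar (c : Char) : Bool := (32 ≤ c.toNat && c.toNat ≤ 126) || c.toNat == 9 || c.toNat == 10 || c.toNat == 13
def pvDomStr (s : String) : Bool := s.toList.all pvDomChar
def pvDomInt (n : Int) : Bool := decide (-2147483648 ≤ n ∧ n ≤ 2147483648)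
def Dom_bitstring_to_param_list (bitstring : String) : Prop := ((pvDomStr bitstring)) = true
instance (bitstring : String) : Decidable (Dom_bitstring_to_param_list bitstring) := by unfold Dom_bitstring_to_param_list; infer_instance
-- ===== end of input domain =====

-- B replaces A's index-by-index loop with two closed-form slices; objective: simpler.

-- ===== PORT A =====
-- loop body of A: on index i, append bitstring[i] to param_1 (i < 8) or param_2 (8 ≤ i < 16)
def pvStepA (cs : List Char) (p : List Char × List Char) (i : Int) : List Char × List Char :=
  if i < 8 then (p.1 ++ [PySem.List.pyGetD cs i ' '], p.2)
  else if 8 ≤ i ∧ i < 16 then (p.1, p.2 ++ [PySem.List.pyGetD cs i ' '])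
  else p

def bitstring_to_param_list (bitstring : String) : List String :=
  let cs := bitstring.toList
  let p := (PySem.List.pyRange 0 (cs.length : Int) 1).foldl (pvStepA cs) ([], [])
  [String.ofList p.1, String.ofList p.2]

-- ===== PORT B =====
def bitstring_to_param_list_alt (bitstring : String) : List String :=
  let cs := bitstring.toList
  [String.ofList (PySem.List.slice cs none (some 8)), String.ofList (PySem.List.slice cs (some 8) (some 16))]

-- ===== PRECONDITION & SPEC =====
def Spec_bitstring_to_param_list (bitstring : String) (out : List String) : Prop := out = bitstring_to_param_list_alt bitstring
instance (bitstring : String) (out : List String) : Decidable (Spec_bitstring_to_param_list bitstring out) := by unfold Spec_bitstring_to_param_list; infer_instance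

-- ===== CLAIM (what is proved, stated in full; the proofs are below) =====
def Claim_equal_bitstring_to_param_list : Prop := ∀ (bitstring : String), Dom_bitstring_to_param_list bitstring → Spec_bitstring_to_param_list bitstring (bitstring_to_param_list bitstring)

-- ===== LEMMAS AND PROOFS =====

-- loop invariant: after the first n iterations, param_1 = cs.take (min n 8) and param_2 = (cs.drop 8).take (min (n-8) 8)
theorem pvLoopA_eq (cs : List Char) (n : Nat) (hn : n ≤ cs.length) :
    (PySem.List.pyRange 0 (n : Int) 1).foldl (pvStepA cs) ([], []) =
      (cs.take (min n 8), (cs.drop 8).take (min (n - 8) 8)) := by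
  induction n with
  | zero => simp
  | succ m ih =>
    have hm : m < cs.length := by omega
    have hcast : ((m : Int) + 1) = ((m + 1 : Nat) : Int) := by push_cast; ring
    rw [← hcast, PySem.List.pyRange_one_succ_right (by positivity),
        List.foldl_append, ih (by omega)]
    simp only [List.foldl_cons, List.foldl_nil, pvStepA]
    have hget : PySem.List.pyGetD cs (m : Int) ' ' = cs[m] := by
      simpa using PySem.List.pyGetD_ofNat (xs := cs) (n := m) (d := ' ') hm
    by_cases h8 : m < 8
    · have hlt : (m : Int) < 8 := by exact_mod_cast h8
      simp only [if_pos hlt, hget]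
      rw [show min m 8 = m by omega, show min (m + 1) 8 = m + 1 by omega, Prod.mk.injEq]
      exact ⟨(List.take_succ_eq_append_getElem hm).symm, by congr 1; omega⟩
    · have hnot : ¬ ((m : Int) < 8) := by exact_mod_cast h8
      by_cases h16 : m < 16
      · have hc : (8 : Int) ≤ (m : Int) ∧ (m : Int) < 16 := by
          constructor <;> [exact_mod_cast not_lt.mp h8; exact_mod_cast h16]
        simp only [if_neg hnot, if_pos hc, hget]
        rw [show min m 8 = 8 by omega, show min (m + 1) 8 = 8 by omega, Prod.mk.injEq]
        refine ⟨rfl, ?_⟩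
        have hlen : m - 8 < (cs.drop 8).length := by simp [List.length_drop]; omega
        have hgd : (cs.drop 8)[m - 8] = cs[m] := by
          rw [List.getElem_drop]
          congr 1; omega
        rw [show min (m + 1 - 8) 8 = (m - 8) + 1 by omega,
            show min (m - 8) 8 = m - 8 by omega,
            List.take_succ_eq_append_getElem hlen, hgd]
      · have hc : ¬ ((8 : Int) ≤ (m : Int) ∧ (m : Int) < 16) := by
          intro ⟨_, h⟩; exact h16 (by exact_mod_cast h)
        simp only [if_neg hnot, if_neg hc, Prod.mk.injEq]
        exact ⟨by congr 1; omega, by congr 1; omega⟩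

-- ===== VERDICT (by name: the statement is the Claim_ definition above) =====
theorem bitstring_to_param_list_spec : Claim_equal_bitstring_to_param_list := by
  intro s _
  unfold Spec_bitstring_to_param_list bitstring_to_param_list bitstring_to_param_list_alt
  dsimp only
  rw [pvLoopA_eq s.toList s.toList.length le_rfl]
  have h1 : PySem.List.slice s.toList none (some 8) = s.toList.take 8 := by
    have := PySem.List.slice_to_natCast (xs := s.toList) (b := 8)
    norm_num at this; exact this
  have h2 : PySem.List.slice s.toList (some 8) (some 16) = (s.toList.drop 8).take 8 := by
    have := PySem.List.slice_natCast (xs := s.toList) (a := 8) (b := 16)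
    norm_num at this; exact this
  rw [h1, h2]
  have e1 : List.take (min s.toList.length 8) s.toList = List.take 8 s.toList := by
    rw [Nat.min_comm, ← List.take_take, List.take_length]
  have e2 : List.take (min (s.toList.length - 8) 8) (List.drop 8 s.toList)
      = List.take 8 (List.drop 8 s.toList) := by
    rw [Nat.min_comm, ← List.take_take, ← List.length_drop, List.take_length]
  rw [e1, e2]
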